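-- pv_equiv track=rewrite | github.com/Emopusta/DropBox | EmopEncryption.py | EmopEncryption
-- ===== SOURCE A (Python) =====
-- def AsciiToBinary(asciiNum):
--     binNumber = ""
--     while asciiNum>0:
--         if asciiNum%2==1:
--             binNumber+="1"
--         else:
--             binNumber+="0"
--         asciiNum //=2
--     while len(binNumber)%4 != 0:
--         binNumber+="0"
--     return binNumber [::-1]
--
--     """XORFunc adından da anlaşılacağı üzere string binary sayıyı alır ve XORlanmış halini geri döndürür
-- örnek: XORFunc("101010101010") returns "010101010101" """
--
-- def XORFunc(BinaryNum):
--     xoredBinaryNum = ""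
--     for i in BinaryNum:
--         if i=="0":
--             xoredBinaryNum += "1"
--         else:
--             xoredBinaryNum += "0"
--     return xoredBinaryNum
--
-- def BinaryToAscii(binaryNum):
--     counter = 0
--     total=0
--     for i in binaryNum[::-1]:
--         if i == "1":
--             total += pow(2,counter)
--         counter+=1
--     return total
--
-- def EmopEncryption(text,key):
--     temp = []
--     bin_lst = []
--     xor_lst = []
--     asci_lst = []
--     chr_lst = []
--     emopText = ""
--     for i in text:
--         temp.append(ord(i))
--         bin_lst.append(AsciiToBinary((ord(i)*key)))
--     for i in bin_lst:
--         xor_lst.append(XORFunc(i))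
--     for i in xor_lst:
--         asci_lst.append(hex(BinaryToAscii(i)))
--     for i in asci_lst:
--         chr_lst.append(i)
--         emopText += str(i) + " "
--     return emopText
-- ===== SOURCE B (Python) =====
-- def EmopEncryption(text, key):
--     out = []
--     for c in text:
--         v = ord(c) * key
--         if v <= 0:
--             val = 0
--         else:
--             L = ((v.bit_length() + 3) // 4) * 4
--             val = (1 << L) - 1 - v
--         out.append(hex(val) + " ")
--     return "".join(out)
-- ===== Notes on version B (the rewrite author's own statement) =====
-- stated objective: faster
-- what changed: B replaces A's per-character binary-string construction, string XOR, string-to-int reconversion and four intermediate lists by a single pass computing each token arithmetically: v = ord(c)*key, val = 0 if v <= 0 else (1 << ceil4(v.bit_length())) - 1 - v, emitting hex(val) + ' '.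
import Mathlib
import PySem

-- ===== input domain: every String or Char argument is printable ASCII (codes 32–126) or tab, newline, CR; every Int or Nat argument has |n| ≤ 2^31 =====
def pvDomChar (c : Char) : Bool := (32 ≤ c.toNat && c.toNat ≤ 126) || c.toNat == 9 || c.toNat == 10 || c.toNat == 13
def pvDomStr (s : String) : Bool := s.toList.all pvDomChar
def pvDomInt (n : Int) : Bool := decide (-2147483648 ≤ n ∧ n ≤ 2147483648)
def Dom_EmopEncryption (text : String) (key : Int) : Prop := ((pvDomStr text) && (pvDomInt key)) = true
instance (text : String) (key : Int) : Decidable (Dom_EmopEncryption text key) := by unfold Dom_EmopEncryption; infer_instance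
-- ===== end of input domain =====

-- B replaces A's per-char binary-string build / XOR / reconvert passes by one arithmetic
-- closed form per character (objective: simpler); both produce the same return value.

-- ===== PORT A =====
-- Binary "strings" are List Char; text iteration is over text.toList; s[::-1] on these
-- freshly built char lists is List.reverse (exact). Python's hex() is the shared helper
-- pvHex, exact for the nonnegative arguments both programs pass to it.

-- shared helper for Python's hex(n), n ≥ 0 (hex(0) = "0x0"; lowercase digits)
def pvHex (n : Int) : List Char := '0' :: 'x' :: Nat.toDigits 16 n.toNat

-- 'while asciiNum > 0:' loop of AsciiToBinary, building the LSB-first digit string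
def pvBitsLoop (v : Int) : List Char :=
  if _h : 0 < v then
    (if PySem.Int.mod v 2 = 1 then '1' else '0') :: pvBitsLoop (PySem.Int.floordiv v 2)
  else []
termination_by v.toNat
decreasing_by
  rw [PySem.Int.floordiv_eq_ediv_of_pos (by omega)]; omega

-- 'while len(binNumber) % 4 != 0: binNumber += "0"'
def pvPadLoop (l : List Char) : List Char :=
  if l.length % 4 ≠ 0 then pvPadLoop (l ++ ['0']) else l
termination_by (4 - l.length % 4) % 4
decreasing_by simp; omega

def AsciiToBinary (asciiNum : Int) : List Char :=
  (pvPadLoop (pvBitsLoop asciiNum)).reverse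

def XORFunc (binaryNum : List Char) : List Char :=
  binaryNum.foldl (fun acc i => acc ++ [if i = '0' then '1' else '0']) []

-- counter kept as a Nat: it starts at 0 and only increases, so pow(2, counter) = 2 ^ counter
def BinaryToAscii (binaryNum : List Char) : Int :=
  (binaryNum.reverse.foldl
    (fun (p : Nat × Int) i => (p.1 + 1, p.2 + if i = '1' then 2 ^ p.1 else 0))
    (0, 0)).2

def EmopEncryption (text : String) (key : Int) : String :=
  let binLst := text.toList.foldl
    (fun acc i => acc ++ [AsciiToBinary ((i.toNat : Int) * key)]) []
  let xorLst := binLst.foldl (fun acc i => acc ++ [XORFunc i]) []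
  let asciLst := xorLst.foldl (fun acc i => acc ++ [pvHex (BinaryToAscii i)]) []
  String.ofList (asciLst.foldl (fun acc i => acc ++ i ++ [' ']) [])

-- ===== PORT B =====
-- v.bit_length() for the int v (0 for v ≤ 0, as in Python)
def pvBitLen (v : Int) : Nat :=
  if _h : 0 < v then 1 + pvBitLen (PySem.Int.floordiv v 2) else 0
termination_by v.toNat
decreasing_by
  rw [PySem.Int.floordiv_eq_ediv_of_pos (by omega)]; omega

-- the '//' and '*' on the nonnegative bit length are Nat operations; 1 << L = 2 ^ L
def EmopEncryption_alt (text : String) (key : Int) : String :=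
  String.ofList (text.toList.foldl (fun acc c =>
    let v : Int := (c.toNat : Int) * key
    let val : Int := if v ≤ 0 then 0 else 2 ^ (((pvBitLen v + 3) / 4) * 4) - 1 - v
    acc ++ pvHex val ++ [' ']) [])

-- ===== PRECONDITION & SPEC =====
def Spec_EmopEncryption (text : String) (key : Int) (out : String) : Prop := out = EmopEncryption_alt text key
instance (text : String) (key : Int) (out : String) : Decidable (Spec_EmopEncryption text key out) := by unfold Spec_EmopEncryption; infer_instance

-- ===== CLAIM (what is proved, stated in full; the proofs are below) =====
def Claim_equal_EmopEncryption : Prop := ∀ (text : String) (key : Int), Dom_EmopEncryption text key → Spec_EmopEncryption text key (EmopEncryption text key)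

-- ===== LEMMAS AND PROOFS =====

-- value of an LSB-first binary digit string
def pvVal : List Char → Int
  | [] => 0
  | c :: t => (if c = '1' then 1 else 0) + 2 * pvVal t

theorem pvBitsLoop_val (v : Int) (h : 0 ≤ v) : pvVal (pvBitsLoop v) = v := by
  induction v using pvBitsLoop.induct with
  | case1 v hv ih =>
    have hfm := PySem.Int.floordiv_mul_add_mod v 2
    have h0 : 0 ≤ PySem.Int.mod v 2 := PySem.Int.mod_nonneg v (by norm_num)
    have h2 : PySem.Int.mod v 2 < 2 := PySem.Int.mod_lt v (by norm_num)
    have hih := ih (by omega)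
    rw [pvBitsLoop, dif_pos hv]
    simp only [pvVal, hih]
    split_ifs <;> simp_all <;> omega
  | case2 v hv => rw [pvBitsLoop, dif_neg hv]; simp [pvVal]; omega

theorem pvBitsLoop_len (v : Int) : (pvBitsLoop v).length = pvBitLen v := by
  induction v using pvBitsLoop.induct with
  | case1 v hv ih => rw [pvBitsLoop, dif_pos hv, pvBitLen, dif_pos hv]; simp only [List.length_cons, ih]; omega
  | case2 v hv => rw [pvBitsLoop, dif_neg hv, pvBitLen, dif_neg hv]; rfl

theorem pvBitsLoop_binary (v : Int) : ∀ c ∈ pvBitsLoop v, c = '0' ∨ c = '1' := by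
  induction v using pvBitsLoop.induct with
  | case1 v hv ih =>
    rw [pvBitsLoop, dif_pos hv]
    intro c hc
    rcases List.mem_cons.1 hc with h | h
    · split_ifs at h <;> simp [h]
    · exact ih c h
  | case2 v hv => rw [pvBitsLoop, dif_neg hv]; intro c hc; simp at hc

theorem pvPadLoop_eq (l : List Char) :
    pvPadLoop l = l ++ List.replicate ((4 - l.length % 4) % 4) '0' := by
  induction l using pvPadLoop.induct with
  | case1 l hl ih =>
    rw [pvPadLoop, if_pos hl, ih]
    have h1 : (4 - l.length % 4) % 4 = (4 - (l ++ ['0']).length % 4) % 4 + 1 := by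
      simp; omega
    rw [h1, List.replicate_succ, List.append_assoc]
    rfl
  | case2 l hl =>
    rw [pvPadLoop, if_neg hl]
    have : (4 - l.length % 4) % 4 = 0 := by omega
    simp [this]

theorem pvVal_append (l m : List Char) :
    pvVal (l ++ m) = pvVal l + 2 ^ l.length * pvVal m := by
  induction l with
  | nil => simp [pvVal]
  | cons c t ih => simp [pvVal, ih, pow_succ]; ring

theorem pvVal_replicate_zero (k : Nat) : pvVal (List.replicate k '0') = 0 := by
  induction k with
  | zero => rfl
  | succ n ih => simp [List.replicate_succ, pvVal, ih]

def pvFlip (c : Char) : Char := if c = '0' then '1' else '0'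

theorem pvVal_map_flip (l : List Char) (hb : ∀ c ∈ l, c = '0' ∨ c = '1') :
    pvVal (l.map pvFlip) = 2 ^ l.length - 1 - pvVal l := by
  induction l with
  | nil => simp [pvVal]
  | cons c t ih =>
    have hc := hb c (List.mem_cons_self ..)
    have ht := ih (fun x hx => hb x (List.mem_cons_of_mem _ hx))
    rcases hc with h | h <;>
      simp [h, pvVal, pvFlip, ht, pow_succ] <;> ring

theorem XORFunc_eq_map (b : List Char) : XORFunc b = b.map pvFlip := by
  unfold XORFunc pvFlip
  rw [PySem.List.foldl_append_singleton_eq_map]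
  rfl

theorem pvCounterFold (l : List Char) (c : Nat) (t : Int) :
    (l.foldl (fun (p : Nat × Int) i => (p.1 + 1, p.2 + if i = '1' then 2 ^ p.1 else 0))
      (c, t)).2 = t + 2 ^ c * pvVal l := by
  induction l generalizing c t with
  | nil => simp [pvVal]
  | cons i tl ih =>
    simp only [List.foldl_cons, ih, pvVal, pow_succ]
    split_ifs <;> ring

theorem BinaryToAscii_eq (s : List Char) : BinaryToAscii s = pvVal s.reverse := by
  unfold BinaryToAscii
  rw [pvCounterFold]
  simp

-- per-character core: A's binary/XOR/reconvert pipeline equals B's closed form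
theorem pvCore (v : Int) :
    BinaryToAscii (XORFunc (AsciiToBinary v)) =
      if v ≤ 0 then 0 else 2 ^ (((pvBitLen v + 3) / 4) * 4) - 1 - v := by
  by_cases hv : 0 < v
  · rw [if_neg (by omega)]
    unfold AsciiToBinary
    rw [pvPadLoop_eq, XORFunc_eq_map, BinaryToAscii_eq, ← List.map_reverse,
      List.reverse_reverse]
    have hb : ∀ c ∈ pvBitsLoop v ++
        List.replicate ((4 - (pvBitsLoop v).length % 4) % 4) '0', c = '0' ∨ c = '1' := by
      intro c hc
      rcases List.mem_append.1 hc with h | h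
      · exact pvBitsLoop_binary v c h
      · left; exact List.eq_of_mem_replicate h
    rw [pvVal_map_flip _ hb, pvVal_append, pvVal_replicate_zero, pvBitsLoop_val v (by omega)]
    have hlen : (pvBitsLoop v ++
        List.replicate ((4 - (pvBitsLoop v).length % 4) % 4) '0').length =
        ((pvBitLen v + 3) / 4) * 4 := by
      rw [List.length_append, List.length_replicate, ← pvBitsLoop_len]
      omega
    rw [hlen]; ring
  · rw [if_pos (by omega)]
    have h1 : pvBitsLoop v = [] := by rw [pvBitsLoop, dif_neg hv]
    have h2 : pvPadLoop ([] : List Char) = [] := by rw [pvPadLoop]; simp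
    simp [AsciiToBinary, h1, h2, XORFunc, BinaryToAscii, List.foldl_nil]

-- ===== VERDICT (by name: the statement is the Claim_ definition above) =====
theorem EmopEncryption_spec : Claim_equal_EmopEncryption := by
  intro text key _
  unfold Spec_EmopEncryption EmopEncryption EmopEncryption_alt
  simp only [PySem.List.foldl_append_singleton_eq_map, List.nil_append, List.map_map]
  rw [show (fun (acc : List Char) (i : List Char) => acc ++ i ++ [' ']) =
        (fun acc i => acc ++ (i ++ [' '])) from by funext acc i; simp,
      PySem.List.foldl_append_eq_flatMap]
  rw [show (fun (acc : List Char) (c : Char) =>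
        acc ++ pvHex (if (c.toNat : Int) * key ≤ 0 then 0
          else 2 ^ (((pvBitLen ((c.toNat : Int) * key) + 3) / 4) * 4) - 1 -
            (c.toNat : Int) * key) ++ [' ']) =
        (fun acc c => acc ++ (pvHex (if (c.toNat : Int) * key ≤ 0 then 0
          else 2 ^ (((pvBitLen ((c.toNat : Int) * key) + 3) / 4) * 4) - 1 -
            (c.toNat : Int) * key) ++ [' '])) from by funext acc c; simp,
      PySem.List.foldl_append_eq_flatMap]
  simp only [List.nil_append, List.flatMap_map]
  congr 1
  induction text.toList with
  | nil => rfl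
  | cons c t iht =>
    simp only [List.flatMap_cons, iht]
    congr 2
    simp only [Function.comp_apply]
    rw [pvCore]
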